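-- pv_equiv track=rewrite | github.com/Krysta1/Offer-Python | 003_1_找出数组中的重复数字.py | duplicate2
-- ===== SOURCE A (Python) =====
-- def duplicate2(test):
--     count = 0
--     if len(test) == 0:  # if list length is 0 return 0
--         return count
--
--     for num in test:  # if element in test <0 or >(n-1)
--         if num < 0 or num > (len(test) - 1):
--             return 0
--
--     tmp = [-1] * len(test)
--     for num in test:
--         if tmp[num] == -1:
--             tmp[num] = num
--         else:
--             if tmp[num] == -2:
--                 continue
--             tmp[num] = -2
--             count += 1
--
--     return count
-- ===== SOURCE B (Python) =====
-- def duplicate2(test):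
--     n = len(test)
--     if n == 0:
--         return 0
--     for num in test:
--         if num < 0 or num > n - 1:
--             return 0
--     counts = {}
--     for num in test:
--         counts[num] = counts.get(num, 0) + 1
--     return sum(1 for v in counts.values() if v >= 2)
-- ===== Notes on version B (the rewrite author's own statement) =====
-- stated objective: simpler
-- what changed: Replaces A's -1/-2 sentinel state machine over a preallocated tmp array with a plain frequency dict built in one pass followed by counting the distinct values that occur at least twice.
import Mathlib
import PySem

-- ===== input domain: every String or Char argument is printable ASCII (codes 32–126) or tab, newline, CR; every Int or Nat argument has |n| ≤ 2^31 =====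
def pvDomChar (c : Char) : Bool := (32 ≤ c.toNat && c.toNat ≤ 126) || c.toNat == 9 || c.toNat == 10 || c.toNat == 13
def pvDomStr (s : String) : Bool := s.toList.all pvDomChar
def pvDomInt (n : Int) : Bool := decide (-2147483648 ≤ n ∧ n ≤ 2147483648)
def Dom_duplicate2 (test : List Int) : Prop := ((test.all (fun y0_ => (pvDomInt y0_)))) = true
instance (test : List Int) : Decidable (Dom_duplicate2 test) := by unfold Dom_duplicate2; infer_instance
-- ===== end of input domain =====

-- B replaces A's -1/-2 sentinel state machine over a preallocated tmp array with a frequency dict plus a scan of its values; same O(n) cost, simpler.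


-- ===== PORT A =====
def duplicate2 (test : List Int) : Int :=
  if test.length = 0 then 0
  else if test.any (fun num => decide (num < 0) || decide ((test.length : Int) - 1 < num)) then 0
  else
    -- past the guard every num satisfies 0 ≤ num < len(test), so Python's tmp[num]
    -- is plain in-range indexing: getD/set at num.toNat is exact here
    (test.foldl (fun (s : List Int × Int) num =>
      let t := s.1.getD num.toNat 0
      if t = -1 then (s.1.set num.toNat num, s.2)
      else if t = -2 then s
      else (s.1.set num.toNat (-2), s.2 + 1))
      (List.replicate test.length (-1 : Int), 0)).2

-- ===== PORT B =====
def duplicate2_alt (test : List Int) : Int :=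
  if test.length = 0 then 0
  else if test.any (fun num => decide (num < 0) || decide ((test.length : Int) - 1 < num)) then 0
  else
    let counts := test.foldl
      (fun (d : PySem.Dict Int Int) num => d.insert num (d.getD num 0 + 1)) PySem.Dict.empty
    ((counts.values.filter (fun v => decide (2 ≤ v))).map (fun _ => (1 : Int))).sum

-- ===== PRECONDITION & SPEC =====
def Spec_duplicate2 (test : List Int) (out : Int) : Prop := out = duplicate2_alt test
instance (test : List Int) (out : Int) : Decidable (Spec_duplicate2 test out) := by unfold Spec_duplicate2; infer_instance

-- ===== CLAIM (what is proved, stated in full; the proofs are below) =====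
def Claim_equal_duplicate2 : Prop := ∀ (test : List Int), Dom_duplicate2 test → Spec_duplicate2 test (duplicate2 test)

-- ===== LEMMAS AND PROOFS =====

-- encoding of A's tmp array after processing prefix p (n = len(test))
def encA (n : Nat) (p : List Int) : List Int :=
  (List.range n).map (fun i =>
    if 2 ≤ p.count (Int.ofNat i) then -2 else if p.count (Int.ofNat i) = 1 then Int.ofNat i else -1)

-- A's running count after processing prefix p
def dupcnt (n : Nat) (p : List Int) : Int :=
  ((List.range n).countP (fun i => decide (2 ≤ p.count (Int.ofNat i))) : Int)

theorem encA_length (n : Nat) (p : List Int) : (encA n p).length = n := by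
  simp [encA]

theorem countP_flip {α : Type} [DecidableEq α] (l : List α) (f g : α → Bool) (a : α)
    (hnd : l.Nodup) (ha : a ∈ l) (hfg : ∀ i ∈ l, i ≠ a → f i = g i)
    (hf : f a = false) (hg : g a = true) : l.countP g = l.countP f + 1 := by
  induction l with
  | nil => cases ha
  | cons x t ih =>
    rcases List.mem_cons.mp ha with h | h
    · subst h
      have heq : ∀ i ∈ t, f i = g i := by
        intro i hi
        exact hfg i (List.mem_cons_of_mem _ hi) (by rintro rfl; exact (List.nodup_cons.mp hnd).1 hi)
      have : t.countP f = t.countP g :=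
        List.countP_congr (fun i hi => by rw [heq i hi])
      simp [hf, hg, this]
    · have hx : x ≠ a := by rintro rfl; exact (List.nodup_cons.mp hnd).1 h
      have ht := ih (List.nodup_cons.mp hnd).2 h (fun i hi => hfg i (List.mem_cons_of_mem _ hi))
      simp [List.countP_cons, ht, hfg x (List.mem_cons_self) hx]
      omega

theorem encA_entry (n : Nat) (p : List Int) (x : Int) (hx0 : 0 ≤ x) (hxn : x.toNat < n) :
    (encA n p).getD x.toNat 0 =
      (if 2 ≤ p.count x then -2 else if p.count x = 1 then x else -1) := by
  have hlt : x.toNat < (encA n p).length := by rw [encA_length]; exact hxn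
  rw [List.getD_eq_getElem _ _ hlt]
  unfold encA
  rw [List.getElem_map, List.getElem_range,
    show Int.ofNat x.toNat = x from Int.toNat_of_nonneg hx0]

theorem encA_set (n : Nat) (p : List Int) (x : Int) (hx0 : 0 ≤ x) (_hxn : x.toNat < n) (v : Int)
    (hv : v = (if 2 ≤ (p ++ [x]).count x then -2 else if (p ++ [x]).count x = 1 then x else -1)) :
    encA n (p ++ [x]) = (encA n p).set x.toNat v := by
  apply List.ext_getElem
  · simp [encA]
  · intro i h1 h2
    have hi : i < n := by simpa [encA] using h1
    rw [List.getElem_set]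
    unfold encA
    rw [List.getElem_map, List.getElem_map, List.getElem_range]
    by_cases hix : x.toNat = i
    · rw [if_pos hix, ← hix]
      have hxx : Int.ofNat x.toNat = x := Int.toNat_of_nonneg hx0
      rw [hxx, hv]
    · have hne : Int.ofNat i ≠ x := by
        simp only [Int.ofNat_eq_natCast]
        intro hc
        exact hix (by omega)
      have h0 : List.count (Int.ofNat i) [x] = 0 := by
        rw [List.count_eq_zero]
        simp only [Int.ofNat_eq_natCast] at hne ⊢
        simp [hne]
      have hcnt : (p ++ [x]).count (Int.ofNat i) = p.count (Int.ofNat i) := by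
        rw [List.count_append, h0, Nat.add_zero]
      rw [if_neg hix, hcnt]

theorem count_append_self (p : List Int) (x : Int) :
    (p ++ [x]).count x = p.count x + 1 := by
  simp [List.count_append]

theorem dupcnt_append (n : Nat) (p : List Int) (x : Int) (hx0 : 0 ≤ x) (hxn : x.toNat < n) :
    dupcnt n (p ++ [x]) = dupcnt n p + (if p.count x = 1 then 1 else 0) := by
  have hxi : Int.ofNat x.toNat = x := Int.toNat_of_nonneg hx0
  have hother : ∀ i ∈ List.range n, i ≠ x.toNat →
      (decide (2 ≤ p.count (Int.ofNat i)) : Bool)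
        = decide (2 ≤ (p ++ [x]).count (Int.ofNat i)) := by
    intro i _ hne
    have hxne : Int.ofNat i ≠ x := by
      simp only [Int.ofNat_eq_natCast]
      intro hcc; exact hne (by omega)
    have h0 : List.count (Int.ofNat i) [x] = 0 := by
      rw [List.count_eq_zero]
      simp only [Int.ofNat_eq_natCast] at hxne ⊢
      simp [hxne]
    rw [List.count_append, h0, Nat.add_zero]
  by_cases hc1 : p.count x = 1
  · have hflip := countP_flip (List.range n)
      (fun i => decide (2 ≤ p.count (Int.ofNat i)))
      (fun i => decide (2 ≤ (p ++ [x]).count (Int.ofNat i)))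
      x.toNat (List.nodup_range) (List.mem_range.mpr hxn) hother
      (by show decide (2 ≤ p.count (Int.ofNat x.toNat)) = false
          rw [hxi]; simp [hc1])
      (by show decide (2 ≤ (p ++ [x]).count (Int.ofNat x.toNat)) = true
          rw [hxi, count_append_self, hc1]; norm_num)
    unfold dupcnt
    rw [hflip, hc1]
    norm_num
  · have heq : (List.range n).countP (fun i => decide (2 ≤ (p ++ [x]).count (Int.ofNat i)))
        = (List.range n).countP (fun i => decide (2 ≤ p.count (Int.ofNat i))) := by
      apply List.countP_congr
      intro i hi
      by_cases hix : i = x.toNat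
      · subst hix
        show decide (2 ≤ (p ++ [x]).count (Int.ofNat x.toNat)) = true
          ↔ decide (2 ≤ p.count (Int.ofNat x.toNat)) = true
        rw [hxi, count_append_self]
        simp only [decide_eq_true_eq]
        omega
      · rw [hother i hi hix]
    unfold dupcnt
    rw [heq, if_neg hc1]
    ring

theorem loopA_step (n : Nat) (p : List Int) (x : Int) (c : Int)
    (hx0 : 0 ≤ x) (hxn : x.toNat < n) :
    (let t := (encA n p).getD x.toNat 0
     if t = -1 then ((encA n p).set x.toNat x, c + dupcnt n p)
     else if t = -2 then (encA n p, c + dupcnt n p)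
     else ((encA n p).set x.toNat (-2), c + dupcnt n p + 1))
    = (encA n (p ++ [x]), c + dupcnt n (p ++ [x])) := by
  rw [encA_entry n p x hx0 hxn]
  rcases Nat.lt_or_ge (p.count x) 1 with h0 | h1
  · -- first occurrence
    have hc : p.count x = 0 := by omega
    have ht : (if 2 ≤ p.count x then (-2:Int) else if p.count x = 1 then x else -1) = -1 := by
      rw [hc]; norm_num
    have hv : (x:Int) = (if 2 ≤ (p ++ [x]).count x then -2 else if (p ++ [x]).count x = 1 then x else -1) := by
      rw [count_append_self, hc]; norm_num
    simp only [ht]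
    rw [← encA_set n p x hx0 hxn x hv, dupcnt_append n p x hx0 hxn, hc]
    norm_num
  · rcases Nat.lt_or_ge (p.count x) 2 with h2 | h2
    · -- second occurrence
      have hc : p.count x = 1 := by omega
      have hne1 : x ≠ -1 := by omega
      have hne2 : x ≠ -2 := by omega
      have ht : (if 2 ≤ p.count x then (-2:Int) else if p.count x = 1 then x else -1) = x := by
        rw [hc]; norm_num
      have hv : (-2:Int) = (if 2 ≤ (p ++ [x]).count x then -2 else if (p ++ [x]).count x = 1 then x else -1) := by
        rw [count_append_self, hc]; norm_num
      simp only [ht, if_neg hne1, if_neg hne2]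
      rw [← encA_set n p x hx0 hxn (-2) hv, dupcnt_append n p x hx0 hxn, hc]
      norm_num
      ring
    · -- third or later occurrence: tmp entry is -2, state unchanged
      have ht : (if 2 ≤ p.count x then (-2:Int) else if p.count x = 1 then x else -1) = -2 := by
        rw [if_pos h2]
      have hv : (-2:Int) = (if 2 ≤ (p ++ [x]).count x then -2 else if (p ++ [x]).count x = 1 then x else -1) := by
        rw [count_append_self]
        have : 2 ≤ p.count x + 1 := by omega
        rw [if_pos this]
      have hset : (encA n p).set x.toNat (-2) = encA n p := by
        apply List.ext_getElem
        · simp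
        · intro i hA hB
          rw [List.getElem_set]
          by_cases hix : x.toNat = i
          · have he := encA_entry n p x hx0 hxn
            rw [List.getD_eq_getElem _ _ (by rw [encA_length]; exact hxn)] at he
            subst hix
            rw [if_pos rfl, he, if_pos h2]
          · rw [if_neg hix]
      have hA : encA n (p ++ [x]) = encA n p := by
        rw [encA_set n p x hx0 hxn (-2) hv, hset]
      have hD : dupcnt n (p ++ [x]) = dupcnt n p := by
        rw [dupcnt_append n p x hx0 hxn]
        have : ¬ p.count x = 1 := by omega
        rw [if_neg this]; ring
      simp only [ht]
      rw [hA, hD]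
      simp
theorem loopA (n : Nat) (l p : List Int) (c : Int)
    (hl : ∀ x ∈ l, 0 ≤ x ∧ x.toNat < n) :
    l.foldl (fun (s : List Int × Int) num =>
      let t := s.1.getD num.toNat 0
      if t = -1 then (s.1.set num.toNat num, s.2)
      else if t = -2 then s
      else (s.1.set num.toNat (-2), s.2 + 1)) (encA n p, c + dupcnt n p)
    = (encA n (p ++ l), c + dupcnt n (p ++ l)) := by
  induction l generalizing p with
  | nil => simp
  | cons x t ih =>
    have hx := hl x (List.mem_cons_self)
    have step' : (let tv := (encA n p, c + dupcnt n p).1.getD x.toNat 0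
        if tv = -1 then ((encA n p, c + dupcnt n p).1.set x.toNat x, (encA n p, c + dupcnt n p).2)
        else if tv = -2 then (encA n p, c + dupcnt n p)
        else ((encA n p, c + dupcnt n p).1.set x.toNat (-2), (encA n p, c + dupcnt n p).2 + 1))
        = (encA n (p ++ [x]), c + dupcnt n (p ++ [x])) :=
      loopA_step n p x c hx.1 hx.2
    rw [List.foldl_cons, step', show (p ++ x :: t) = (p ++ [x]) ++ t by simp]
    exact ih (p ++ [x]) (fun y hy => hl y (List.mem_cons_of_mem _ hy))

theorem encA_nil (n : Nat) : encA n [] = List.replicate n (-1 : Int) := by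
  simp [encA]

-- B's non-trivial branch counts the distinct values occurring ≥ 2 times
theorem B_branch (test : List Int) :
    (((test.foldl (fun (d : PySem.Dict Int Int) num => d.insert num (d.getD num 0 + 1))
        PySem.Dict.empty).values.filter (fun v => decide (2 ≤ v))).map (fun _ => (1 : Int))).sum
    = ((PySem.Set.ofList test).countP (fun k => decide (2 ≤ test.count k)) : Int) := by
  rw [PySem.Dict.foldl_insert_getD_add_one_eq_counter]
  have hv : (PySem.Dict.counter test).values
      = (PySem.Set.ofList test).map (fun k => (test.count k : Int)) := by
    simp [PySem.Dict.values, PySem.Dict.items_counter]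
  rw [hv, List.filter_map]
  simp only [List.map_const', List.sum_replicate, Int.nsmul_eq_mul, mul_one, List.length_map]
  rw [← List.countP_eq_length_filter]
  congr 1
  apply List.countP_congr
  intro k _
  simp only [Function.comp_apply, decide_eq_true_eq]
  omega

theorem bridge (test : List Int) (h : ∀ x ∈ test, 0 ≤ x ∧ x.toNat < test.length) :
    ((PySem.Set.ofList test).countP (fun k => decide (2 ≤ test.count k)) : Int)
    = dupcnt test.length test := by
  unfold dupcnt
  congr 1
  have hmapped : (List.range test.length).countP (fun i => decide (2 ≤ test.count (Int.ofNat i)))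
      = ((List.range test.length).map (fun i => Int.ofNat i)).countP
          (fun k => decide (2 ≤ test.count k)) := by
    rw [List.countP_map]; rfl
  rw [hmapped, List.countP_eq_length_filter, List.countP_eq_length_filter]
  have hnd1 : (List.filter (fun k => decide (2 ≤ test.count k)) (PySem.Set.ofList test)).Nodup :=
    (PySem.Set.nodup_ofList test).filter _
  have hinj : Function.Injective (fun i : Nat => Int.ofNat i) := by
    intro a b hab
    simp only [Int.ofNat_eq_natCast] at hab
    omega
  have hnd2 : (List.filter (fun k => decide (2 ≤ test.count k))
      ((List.range test.length).map (fun i => Int.ofNat i))).Nodup :=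
    (List.nodup_range.map hinj).filter _
  apply ((List.perm_ext_iff_of_nodup hnd1 hnd2).mpr _).length_eq
  intro k
  simp only [List.mem_filter, PySem.Set.mem_ofList, List.mem_map, List.mem_range,
    Int.ofNat_eq_natCast]
  constructor
  · rintro ⟨hk, hp⟩
    exact ⟨⟨k.toNat, (h k hk).2, Int.toNat_of_nonneg (h k hk).1⟩, hp⟩
  · rintro ⟨⟨i, _, rfl⟩, hp⟩
    have hcc : 2 ≤ test.count (i : Int) := by simpa using hp
    exact ⟨List.count_pos_iff.mp (by omega), hp⟩

-- ===== VERDICT (by name: the statement is the Claim_ definition above) =====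
theorem duplicate2_spec : Claim_equal_duplicate2 := by
  intro test _
  unfold Spec_duplicate2 duplicate2 duplicate2_alt
  by_cases h0 : test.length = 0
  · rw [if_pos h0, if_pos h0]
  · rw [if_neg h0, if_neg h0]
    by_cases hrng : test.any (fun num => decide (num < 0) || decide ((test.length : Int) - 1 < num))
    · rw [if_pos hrng, if_pos hrng]
    · rw [if_neg hrng, if_neg hrng]
      have hall : ∀ x ∈ test, 0 ≤ x ∧ x.toNat < test.length := by
        intro x hx
        have := (List.any_eq_false.mp (Bool.eq_false_iff.mpr hrng)) x hx
        simp at this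
        omega
      rw [B_branch, bridge test hall]
      have := loopA test.length test [] 0 hall
      simp only [List.nil_append] at this
      rw [encA_nil] at this
      have d0 : dupcnt test.length [] = 0 := by simp [dupcnt]
      rw [d0] at this
      simp only [add_zero, zero_add] at this
      rw [this]
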